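-- pv_equiv track=rewrite | github.com/slundberg-1955/harness-analytics | harness_analytics/portfolio_aggregates.py | _pick_histogram_bin_days
-- ===== SOURCE A (Python) =====
-- import math
--
-- _HISTOGRAM_BIN_CANDIDATES_DAYS: tuple[int, ...] = (15, 30, 60, 90, 180, 365, 730)
--
-- def _pick_histogram_bin_days(max_days: int) -> int:
--     """Pick a bin width yielding ~5–12 bars across [0, max_days]."""
--     for c in _HISTOGRAM_BIN_CANDIDATES_DAYS:
--         if math.ceil((max_days + 1) / c) <= 12:
--             chosen = c
--             break
--     else:
--         chosen = _HISTOGRAM_BIN_CANDIDATES_DAYS[-1]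
--     # Step down to a smaller candidate when the chart would otherwise have
--     # fewer than 5 bars (looks sparse and uninformative).
--     while (
--         math.ceil((max_days + 1) / chosen) < 5
--         and chosen > _HISTOGRAM_BIN_CANDIDATES_DAYS[0]
--     ):
--         idx = _HISTOGRAM_BIN_CANDIDATES_DAYS.index(chosen)
--         chosen = _HISTOGRAM_BIN_CANDIDATES_DAYS[idx - 1]
--     return chosen
-- ===== SOURCE B (Python) =====
-- _HISTOGRAM_BIN_CANDIDATES_DAYS: tuple[int, ...] = (15, 30, 60, 90, 180, 365, 730)
--
-- def _pick_histogram_bin_days(max_days: int) -> int: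
--     """Pick a bin width yielding ~5-12 bars across [0, max_days]."""
--     cands = _HISTOGRAM_BIN_CANDIDATES_DAYS
--     # c yields at most 12 bars  iff  ceil((max_days+1)/c) <= 12  iff  c >= target
--     target = -(-(max_days + 1) // 12)
--     lo, hi = 0, len(cands)
--     while lo < hi:  # binary search for the first candidate >= target
--         mid = (lo + hi) // 2
--         if cands[mid] < target:
--             lo = mid + 1
--         else:
--             hi = mid
--     return cands[lo] if lo < len(cands) else cands[-1]
-- ===== Notes on version B (the rewrite author's own statement) =====
-- stated objective: alternative
-- what changed: A's linear scan for the first candidate with <= 12 bars plus a step-down while-loop (provably a no-op for this table) is replaced by computing the integer ceiling threshold t = ceil((max_days+1)/12) and binary-searching the sorted candidate table for the first candidate >= t.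
import Mathlib
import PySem

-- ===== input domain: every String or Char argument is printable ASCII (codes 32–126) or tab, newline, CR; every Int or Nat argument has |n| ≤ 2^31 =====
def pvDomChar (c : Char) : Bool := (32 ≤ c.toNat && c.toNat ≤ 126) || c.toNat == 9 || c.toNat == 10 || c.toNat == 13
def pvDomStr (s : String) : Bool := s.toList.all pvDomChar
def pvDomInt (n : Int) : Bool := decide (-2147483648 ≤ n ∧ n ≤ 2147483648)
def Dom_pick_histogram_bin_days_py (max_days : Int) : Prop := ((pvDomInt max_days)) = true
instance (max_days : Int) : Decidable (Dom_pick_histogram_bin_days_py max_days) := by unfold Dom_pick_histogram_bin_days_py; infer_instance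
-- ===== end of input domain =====

-- B replaces A's linear candidate scan plus redundant step-down while-loop by an integer
-- ceiling threshold and a binary search over the sorted candidate table (objective: alternative).

-- ===== PORT A =====
-- the module constant _HISTOGRAM_BIN_CANDIDATES_DAYS
def pvCands : List Int := [15, 30, 60, 90, 180, 365, 730]

-- math.ceil(a / c): equal to integer -((-a) // c) for 0 < c, exact here because on Dom
-- (|a| ≤ 2^31 + 2, c ≤ 730) the float quotient a/c is either an exact integer or more
-- than 2^-22 away from one, so float ceil agrees with integer ceil.
def pvCeilDiv (a c : Int) : Int := -(PySem.Int.floordiv (-a) c)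

-- the for/else loop: first candidate c with ceil((max_days+1)/c) <= 12, else candidates[-1]
def pvPickLoop (max_days : Int) : List Int → Int
  | [] => (PySem.List.pyGet? pvCands (-1)).getD 0   -- candidates[-1]; list non-empty, never the default
  | c :: rest =>
    if pvCeilDiv (max_days + 1) c ≤ 12 then c else pvPickLoop max_days rest

-- the step-down while loop; fuel = |candidates| bounds the iterations (the index strictly decreases)
def pvStepDown (max_days : Int) : Nat → Int → Int
  | 0, chosen => chosen
  | fuel + 1, chosen =>
    if pvCeilDiv (max_days + 1) chosen < 5 ∧ chosen > 15 then
      -- chosen is always a member of the table, so index? is some and pyGet? is in range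
      let idx : Int := ((PySem.List.index? pvCands chosen).getD 0 : Nat)
      pvStepDown max_days fuel ((PySem.List.pyGet? pvCands (idx - 1)).getD 0)
    else chosen

def pick_histogram_bin_days_py (max_days : Int) : Int :=
  pvStepDown max_days pvCands.length (pvPickLoop max_days pvCands)

-- ===== PORT B =====
-- the binary-search while loop of Source B; fuel = len(cands) bounds the iterations (hi - lo halves)
def pvBSearch (target : Int) : Nat → Int → Int → Int
  | 0, lo, _ => lo
  | fuel + 1, lo, hi =>
    if lo < hi then
      let mid := PySem.Int.floordiv (lo + hi) 2
      if (PySem.List.pyGet? pvCands mid).getD 0 < target then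
        pvBSearch target fuel (mid + 1) hi
      else
        pvBSearch target fuel lo mid
    else lo

def pick_histogram_bin_days_py_alt (max_days : Int) : Int :=
  let target := -(PySem.Int.floordiv (-(max_days + 1)) 12)
  let lo := pvBSearch target pvCands.length 0 (pvCands.length : Int)
  if lo < (pvCands.length : Int) then (PySem.List.pyGet? pvCands lo).getD 0
  else (PySem.List.pyGet? pvCands (-1)).getD 0

-- ===== PRECONDITION & SPEC =====
def Spec_pick_histogram_bin_days_py (max_days : Int) (out : Int) : Prop := out = pick_histogram_bin_days_py_alt max_days
instance (max_days : Int) (out : Int) : Decidable (Spec_pick_histogram_bin_days_py max_days out) := by unfold Spec_pick_histogram_bin_days_py; infer_instance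

-- ===== CLAIM (what is proved, stated in full; the proofs are below) =====
def Claim_equal_pick_histogram_bin_days_py : Prop := ∀ (max_days : Int), Dom_pick_histogram_bin_days_py max_days → Spec_pick_histogram_bin_days_py max_days (pick_histogram_bin_days_py max_days)

-- ===== LEMMAS AND PROOFS =====
-- both programs compute this threshold table in M = max_days
def pvTable (M : Int) : Int :=
  if M ≤ 179 then 15 else if M ≤ 359 then 30 else if M ≤ 719 then 60 else if M ≤ 1079 then 90
  else if M ≤ 2159 then 180 else if M ≤ 4379 then 365 else 730

lemma ceil_le_iff (a c q : Int) (hc : 0 < c) : pvCeilDiv a c ≤ q ↔ a ≤ q * c := by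
  unfold pvCeilDiv
  rw [neg_le, PySem.Int.le_floordiv_iff_mul_le hc]
  constructor <;> intro h <;> linarith

lemma ceil_lt_iff (a c q : Int) (hc : 0 < c) : pvCeilDiv a c < q ↔ a ≤ (q - 1) * c := by
  rw [Int.lt_iff_add_one_le, show q = (q - 1) + 1 by ring, add_le_add_iff_right,
    ceil_le_iff _ _ _ hc]
  ring_nf

lemma bs_char (t : Int) : pvBSearch t 7 0 7 =
    if t ≤ 15 then 0 else if t ≤ 30 then 1 else if t ≤ 60 then 2 else if t ≤ 90 then 3
    else if t ≤ 180 then 4 else if t ≤ 365 then 5 else if t ≤ 730 then 6 else 7 := by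
  simp only [pvBSearch,
    show PySem.Int.floordiv (0+7) 2 = 3 from by decide,
    show PySem.Int.floordiv (3+1+7) 2 = 5 from by decide,
    show PySem.Int.floordiv (0+3) 2 = 1 from by decide,
    show PySem.Int.floordiv (5+1+7) 2 = 6 from by decide,
    show PySem.Int.floordiv (3+1+5) 2 = 4 from by decide,
    show PySem.Int.floordiv (1+1+3) 2 = 2 from by decide,
    show PySem.Int.floordiv (0+1) 2 = 0 from by decide,
    show (PySem.List.pyGet? pvCands 0).getD 0 = 15 from by decide,
    show (PySem.List.pyGet? pvCands 1).getD 0 = 30 from by decide,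
    show (PySem.List.pyGet? pvCands 2).getD 0 = 60 from by decide,
    show (PySem.List.pyGet? pvCands 3).getD 0 = 90 from by decide,
    show (PySem.List.pyGet? pvCands 4).getD 0 = 180 from by decide,
    show (PySem.List.pyGet? pvCands 5).getD 0 = 365 from by decide,
    show (PySem.List.pyGet? pvCands 6).getD 0 = 730 from by decide]
  norm_num
  split_ifs <;> omega

lemma altChar (M : Int) : pick_histogram_bin_days_py_alt M = pvTable M := by
  unfold pick_histogram_bin_days_py_alt pvTable
  simp only [show pvCands.length = 7 from rfl, Nat.cast_ofNat]
  rw [show -(PySem.Int.floordiv (-(M + 1)) 12) = pvCeilDiv (M + 1) 12 from rfl, bs_char]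
  simp only [
    show pvCeilDiv (M + 1) 12 ≤ 15 ↔ M ≤ 179 from by rw [ceil_le_iff _ _ _ (by norm_num)]; omega,
    show pvCeilDiv (M + 1) 12 ≤ 30 ↔ M ≤ 359 from by rw [ceil_le_iff _ _ _ (by norm_num)]; omega,
    show pvCeilDiv (M + 1) 12 ≤ 60 ↔ M ≤ 719 from by rw [ceil_le_iff _ _ _ (by norm_num)]; omega,
    show pvCeilDiv (M + 1) 12 ≤ 90 ↔ M ≤ 1079 from by rw [ceil_le_iff _ _ _ (by norm_num)]; omega,
    show pvCeilDiv (M + 1) 12 ≤ 180 ↔ M ≤ 2159 from by rw [ceil_le_iff _ _ _ (by norm_num)]; omega,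
    show pvCeilDiv (M + 1) 12 ≤ 365 ↔ M ≤ 4379 from by rw [ceil_le_iff _ _ _ (by norm_num)]; omega,
    show pvCeilDiv (M + 1) 12 ≤ 730 ↔ M ≤ 8759 from by rw [ceil_le_iff _ _ _ (by norm_num)]; omega]
  split_ifs <;> first | decide | omega

lemma stepDown_noop (M : Int) (fuel : Nat) (chosen : Int)
    (h : ¬(pvCeilDiv (M + 1) chosen < 5 ∧ chosen > 15)) :
    pvStepDown M fuel chosen = chosen := by
  cases fuel <;> simp only [pvStepDown, if_neg h]

lemma AChar (M : Int) : pick_histogram_bin_days_py M = pvTable M := by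
  unfold pick_histogram_bin_days_py pvTable
  simp only [pvCands, List.length, pvPickLoop]
  simp only [show (PySem.List.pyGet? ([15, 30, 60, 90, 180, 365, 730] : List Int) (-1)).getD 0 = 730
    from by decide]
  simp only [
    show pvCeilDiv (M + 1) 15 ≤ 12 ↔ M ≤ 179 from by rw [ceil_le_iff _ _ _ (by norm_num)]; omega,
    show pvCeilDiv (M + 1) 30 ≤ 12 ↔ M ≤ 359 from by rw [ceil_le_iff _ _ _ (by norm_num)]; omega,
    show pvCeilDiv (M + 1) 60 ≤ 12 ↔ M ≤ 719 from by rw [ceil_le_iff _ _ _ (by norm_num)]; omega,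
    show pvCeilDiv (M + 1) 90 ≤ 12 ↔ M ≤ 1079 from by rw [ceil_le_iff _ _ _ (by norm_num)]; omega,
    show pvCeilDiv (M + 1) 180 ≤ 12 ↔ M ≤ 2159 from by rw [ceil_le_iff _ _ _ (by norm_num)]; omega,
    show pvCeilDiv (M + 1) 365 ≤ 12 ↔ M ≤ 4379 from by rw [ceil_le_iff _ _ _ (by norm_num)]; omega,
    show pvCeilDiv (M + 1) 730 ≤ 12 ↔ M ≤ 8759 from by rw [ceil_le_iff _ _ _ (by norm_num)]; omega]
  split_ifs with h1 h2 h3 h4 h5 h6 h7 <;>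
    rw [stepDown_noop] <;>
    first
      | rfl
      | decide
      | (rintro ⟨hlt, hgt⟩
         rw [ceil_lt_iff _ _ _ (by omega)] at hlt
         omega)

-- ===== VERDICT (by name: the statement is the Claim_ definition above) =====
theorem pick_histogram_bin_days_py_spec : Claim_equal_pick_histogram_bin_days_py := by
  intro M _
  unfold Spec_pick_histogram_bin_days_py
  rw [AChar, altChar]
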